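-- pv_equiv track=rewrite | github.com/ksomemo/Competitive-programming | atcoder/abc/108/C.py | loop
-- ===== SOURCE A (Python) =====
-- def loop(N, K):
--     """
--     https://twitter.com/evima0/status/1035894272036237313
--     http://drken1215.hatenablog.com/entry/2018/09/02/011000
--     """
--     x = [0] * K
--     for i in range(1, N+1):
--         # K で割ったあまりがある値になる1-Nまでの個数
--         x[i % K] += 1
--
--     res = 0
--     for a in range(K):
--         # a余る数, K-a余る数(a=0 のときb=c=Kなので余りにする)
--         b = (K - a) % K
--         c = (K - a) % K
--
--         if (b + c) % K == 0:
--             res += x[a] * x[b] * x[c]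
--
--     return res
-- ===== SOURCE B (Python) =====
-- def loop(N, K):
--     # closed form: only remainder classes a with K | 2a contribute, i.e. a = 0 and (K even) a = K//2
--     if N < 0:
--         N = 0
--     q, r = divmod(N, K)
--
--     def cnt(a):
--         # how many i in 1..N have i % K == a
--         return q + (1 if 1 <= a <= r else 0)
--
--     res = cnt(0) ** 3
--     if K % 2 == 0:
--         res += cnt(K // 2) ** 3
--     return res
-- ===== Notes on version B (the rewrite author's own statement) =====
-- stated objective: faster
-- what changed: B replaces A's O(N) bucket-counting loop and O(K) remainder scan by closed-form arithmetic: bucket sizes come from divmod(N, K) and only the remainder classes 0 and (for even K) K//2 can satisfy A's divisibility test, so the answer is cnt(0)**3 plus, for even K, cnt(K//2)**3.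
-- outside the precondition, e.g. on loop(0, 0): A returns 0, B raises ZeroDivisionError; on loop(1, -2): A raises IndexError, B returns -2
import Mathlib
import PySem

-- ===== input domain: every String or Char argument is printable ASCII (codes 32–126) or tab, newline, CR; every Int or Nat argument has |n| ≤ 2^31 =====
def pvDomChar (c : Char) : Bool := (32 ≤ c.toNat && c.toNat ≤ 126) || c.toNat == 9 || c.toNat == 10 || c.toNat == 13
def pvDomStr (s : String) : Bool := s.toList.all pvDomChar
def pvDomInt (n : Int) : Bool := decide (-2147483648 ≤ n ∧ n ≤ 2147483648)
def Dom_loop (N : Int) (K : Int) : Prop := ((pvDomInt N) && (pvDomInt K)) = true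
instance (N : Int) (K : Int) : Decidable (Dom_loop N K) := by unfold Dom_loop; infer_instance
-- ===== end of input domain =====

-- B replaces A's counting loop over 1..N and scan over all K remainders by closed-form arithmetic:
-- only remainder classes a with K | 2a contribute, i.e. a = 0 and, for even K, a = K//2.

-- ===== PORT A =====
-- x[i % K] += 1 ; the Python list x is held as an Array; within Pre_ we have 0 ≤ i % K < K,
-- so setIfInBounds/getD at index (i % K).toNat hit Python's behaviour exactly
def loopStepA (K : Int) (x : Array Int) (i : Int) : Array Int :=
  x.setIfInBounds (PySem.Int.mod i K).toNat (x.getD (PySem.Int.mod i K).toNat 0 + 1)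

def loop (N : Int) (K : Int) : Int :=
  let x := (PySem.List.pyRange 1 (N + 1) 1).foldl (loopStepA K) (Array.replicate K.toNat 0)
  -- a, b, c all lie in [0, K) within Pre_, so .toNat indexing is exact
  (PySem.List.pyRange 0 K 1).foldl (fun res a =>
    let b := PySem.Int.mod (K - a) K
    let c := PySem.Int.mod (K - a) K
    if PySem.Int.mod (b + c) K = 0 then
      res + x.getD a.toNat 0 * x.getD b.toNat 0 * x.getD c.toNat 0
    else res) 0

-- ===== PORT B =====
-- count of i in 1..N with i % K = a, in closed form
def cntB (q r a : Int) : Int := q + if 1 ≤ a ∧ a ≤ r then 1 else 0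

def loop_alt (N : Int) (K : Int) : Int :=
  let N' := if N < 0 then 0 else N
  let q := PySem.Int.floordiv N' K
  let r := PySem.Int.mod N' K
  let res := cntB q r 0 ^ 3
  if PySem.Int.mod K 2 = 0 then res + cntB q r (PySem.Int.floordiv K 2) ^ 3 else res

-- ===== PRECONDITION & SPEC =====
-- Pre_ excludes K = 0, where one of the programs raises ZeroDivisionError (A whenever N ≥ 1, B always),
-- and K < 0 with N ≥ 1, where A raises IndexError on the empty bucket list.
def Pre_loop (N : Int) (K : Int) : Prop := 1 ≤ K ∨ (K ≤ -1 ∧ N ≤ 0)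
instance (N : Int) (K : Int) : Decidable (Pre_loop N K) := by unfold Pre_loop; infer_instance
def pvWitness_loop : Int × Int := (9, 3)

def Spec_loop (N : Int) (K : Int) (out : Int) : Prop := out = loop_alt N K
instance (N : Int) (K : Int) (out : Int) : Decidable (Spec_loop N K out) := by unfold Spec_loop; infer_instance

-- ===== CLAIM (what is proved, stated in full; the proofs are below) =====
def Claim_equal_loop : Prop := ∀ (N : Int) (K : Int), Dom_loop N K → Pre_loop N K → Spec_loop N K (loop N K)

-- ===== LEMMAS AND PROOFS =====

-- the List shadow of loopStepA, used for the induction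
def loopStepL (K : Int) (x : List Int) (i : Int) : List Int :=
  x.set (PySem.Int.mod i K).toNat (x.getD (PySem.Int.mod i K).toNat 0 + 1)

lemma arr_getD (a : Array Int) (i : Nat) (d : Int) : a.getD i d = a.toList.getD i d := by
  by_cases h : i < a.size
  · rw [Array.getD, dif_pos h, List.getD_eq_getElem a.toList d (by simpa using h),
      Array.getElem_toList]
    rfl
  · rw [Array.getD, dif_neg h, List.getD_eq_default]
    simpa using Nat.le_of_not_lt h

lemma toList_loopStepA (K : Int) (x : Array Int) (i : Int) :
    (loopStepA K x i).toList = loopStepL K x.toList i := by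
  unfold loopStepA loopStepL
  rw [Array.toList_setIfInBounds, arr_getD]

lemma fold_bridge (K : Int) (l : List Int) (k : Nat) :
    (l.foldl (loopStepA K) (Array.replicate k 0)).toList
      = l.foldl (loopStepL K) (List.replicate k 0) := by
  rw [← Array.toList_replicate]
  exact (List.foldl_hom Array.toList (fun x y => (toList_loopStepA K x y).symm)).symm

-- the all-zero initial list is the cnt-list for n = 0
lemma replicate_eq_map_cntB (K : Int) :
    List.replicate K.toNat (0 : Int) = (PySem.List.pyRange 0 K 1).map (cntB 0 0) := by
  apply List.ext_getElem
  · simp [PySem.List.length_pyRange_one]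
  · intro j h1 h2
    simp [cntB, PySem.List.getElem_pyRange_one]
    omega

-- one counting step turns the cnt-list for n into the cnt-list for n+1
lemma step_cntB (K n : Int) (hK : 0 < K) :
    loopStepL K ((PySem.List.pyRange 0 K 1).map (cntB (n / K) (n % K))) (n + 1)
      = (PySem.List.pyRange 0 K 1).map (cntB ((n + 1) / K) ((n + 1) % K)) := by
  have hK0 : K ≠ 0 := by omega
  have hm0 : 0 ≤ (n + 1) % K := Int.emod_nonneg _ hK0
  have hmK : (n + 1) % K < K := Int.emod_lt_of_pos _ hK
  have hr0 : 0 ≤ n % K := Int.emod_nonneg _ hK0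
  have hrK : n % K < K := Int.emod_lt_of_pos _ hK
  have hdiv : K * (n / K) + n % K = n := Int.mul_ediv_add_emod n K
  -- relate quotient/remainder of n+1 to those of n
  have hsucc : ((n + 1) / K = n / K + if n % K + 1 = K then 1 else 0)
      ∧ (n + 1) % K = (if n % K + 1 = K then 0 else n % K + 1) := by
    by_cases hcase : n % K + 1 = K
    · have hmul : K * (n / K + 1) = K * (n / K) + K := by ring
      have h := (Int.ediv_emod_unique'' (a := n + 1) (b := K) (q := n / K + 1) (r := 0) hK0).mpr
        ⟨by omega, by omega, by rw [abs_of_pos hK]; omega⟩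
      rw [if_pos hcase, if_pos hcase]
      exact ⟨by omega, h.2⟩
    · have h := (Int.ediv_emod_unique'' (a := n + 1) (b := K) (q := n / K) (r := n % K + 1) hK0).mpr
        ⟨by omega, by omega, by rw [abs_of_pos hK]; omega⟩
      rw [if_neg hcase, if_neg hcase]
      exact ⟨by omega, h.2⟩
  unfold loopStepL
  rw [PySem.Int.mod_eq_emod_of_pos hK]
  have hlen : ((n + 1) % K).toNat
      < ((PySem.List.pyRange 0 K 1).map (cntB (n / K) (n % K))).length := by
    rw [List.length_map, PySem.List.length_pyRange_one]
    omega
  rw [List.getD_eq_getElem _ _ hlen]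
  simp only [List.getElem_map, PySem.List.getElem_pyRange_one]
  apply List.ext_getElem
  · simp
  · intro j h1 h2
    have hjK : (j : Int) < K := by
      have : j < (PySem.List.pyRange 0 K 1).length := by simpa using h2
      rw [PySem.List.length_pyRange_one] at this
      omega
    rw [List.getElem_set]
    simp only [List.getElem_map, PySem.List.getElem_pyRange_one]
    by_cases hc : ((n + 1) % K).toNat = j
    · rw [if_pos hc]
      rw [← hc]
      unfold cntB
      split_ifs <;> omega
    · rw [if_neg hc]
      unfold cntB
      split_ifs <;> omega

-- A's first loop computes exactly B's closed-form cnt-list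
lemma xfold_eq (K : Int) (hK : 0 < K) (n : Int) (hn : 0 ≤ n) :
    (PySem.List.pyRange 1 (n + 1) 1).foldl (loopStepL K) (List.replicate K.toNat 0)
      = (PySem.List.pyRange 0 K 1).map (cntB (PySem.Int.floordiv n K) (PySem.Int.mod n K)) := by
  rw [PySem.Int.floordiv_eq_ediv_of_pos hK, PySem.Int.mod_eq_emod_of_pos hK]
  induction n, hn using Int.le_induction with
  | base =>
      rw [PySem.List.pyRange_one_eq_nil (by omega)]
      simpa using replicate_eq_map_cntB K
  | succ m hm ih =>
      rw [PySem.List.pyRange_one_succ_right (by omega), List.foldl_append]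
      simp only [List.foldl]
      rw [ih]
      exact step_cntB K m hK

lemma getx (q r K a : Int) (h0 : 0 ≤ a) (ha : a < K) :
    ((PySem.List.pyRange 0 K 1).map (cntB q r)).toArray.getD a.toNat 0 = cntB q r a := by
  rw [arr_getD, List.toList_toArray]
  have hlen : a.toNat < ((PySem.List.pyRange 0 K 1).map (cntB q r)).length := by
    rw [List.length_map, PySem.List.length_pyRange_one]; omega
  rw [List.getD_eq_getElem _ _ hlen]
  simp only [List.getElem_map, PySem.List.getElem_pyRange_one]
  congr 1
  omega

lemma foldl_ite_sum (c : Int → Prop) [DecidablePred c] (t : Int → Int) (l : List Int) (init : Int) :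
    l.foldl (fun res a => if c a then res + t a else res) init
      = init + (l.map (fun a => if c a then t a else 0)).sum := by
  induction l generalizing init with
  | nil => simp
  | cons hd tl ih =>
      rw [List.foldl_cons, ih, List.map_cons, List.sum_cons]
      by_cases h : c hd
      · rw [if_pos h, if_pos h]; ring
      · rw [if_neg h, if_neg h]; ring

lemma sum_spike (c v : Int) (l : List Int) (hnd : l.Nodup) :
    (l.map (fun a => if a = c then v else 0)).sum = if c ∈ l then v else 0 := by
  induction l with
  | nil => simp
  | cons hd tl ih =>
      rw [List.map_cons, List.sum_cons, ih (List.Nodup.of_cons hnd)]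
      by_cases h : hd = c
      · subst h
        have hnot : hd ∉ tl := (List.nodup_cons.mp hnd).1
        rw [if_pos rfl, if_neg hnot, if_pos (List.mem_cons_self)]
        ring
      · rw [if_neg h, zero_add]
        by_cases h2 : c ∈ tl
        · rw [if_pos h2, if_pos (List.mem_cons_of_mem _ h2)]
        · rw [if_neg h2, if_neg (by
            intro hm
            rcases List.mem_cons.mp hm with hh | hh
            · exact h hh.symm
            · exact h2 hh)]

-- within 0 ≤ a < K, A's divisibility test fires exactly at a = 0 and (even K) a = K/2
lemma cond_iff (K a : Int) (hK : 0 < K) (h0 : 0 ≤ a) (ha : a < K) :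
    ((K - a) % K + (K - a) % K) % K = 0 ↔ (a = 0 ∨ (K % 2 = 0 ∧ a = K / 2)) := by
  by_cases h : a = 0
  · subst h
    simp
  · have hb : (K - a) % K = K - a := Int.emod_eq_of_lt (by omega) (by omega)
    rw [hb]
    rcases lt_trichotomy (K - a + (K - a)) K with hs | hs | hs
    · rw [Int.emod_eq_of_lt (by omega) hs]
      omega
    · rw [hs, Int.emod_self]
      omega
    · have hshift : (K - a + (K - a)) % K = (K - a + (K - a) - K) % K := by
        have h1 := Int.add_mul_emod_self_left (a := K - a + (K - a) - K) (b := K) (c := 1)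
        have h2 : K - a + (K - a) - K + K * 1 = K - a + (K - a) := by ring
        rw [h2] at h1
        exact h1
      rw [hshift, Int.emod_eq_of_lt (by omega) (by omega)]
      omega

-- the whole remainder scan of A collapses to the two contributing classes
lemma second_fold (q r K : Int) (hK : 0 < K) :
    (PySem.List.pyRange 0 K 1).foldl (fun res a =>
        if ((K - a) % K + (K - a) % K) % K = 0 then
          res + ((PySem.List.pyRange 0 K 1).map (cntB q r)).toArray.getD a.toNat 0
              * ((PySem.List.pyRange 0 K 1).map (cntB q r)).toArray.getD ((K - a) % K).toNat 0
              * ((PySem.List.pyRange 0 K 1).map (cntB q r)).toArray.getD ((K - a) % K).toNat 0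
        else res) 0
      = (if K % 2 = 0 then cntB q r 0 ^ 3 + cntB q r (K / 2) ^ 3 else cntB q r 0 ^ 3) := by
  rw [foldl_ite_sum, zero_add]
  rw [List.map_congr_left (g := fun a =>
      (if a = 0 then cntB q r 0 * cntB q r 0 * cntB q r 0 else 0)
      + (if K % 2 = 0 ∧ a = K / 2 then cntB q r (K / 2) * cntB q r (K / 2) * cntB q r (K / 2) else 0))
    (by
      intro a ha
      beta_reduce
      obtain ⟨h0, haK⟩ := PySem.List.mem_pyRange_one.mp ha
      by_cases h : a = 0
      · subst h
        have hb : (K - 0) % K = 0 := by simp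
        have hc : ((K - 0) % K + (K - 0) % K) % K = 0 := by rw [hb]; simp
        rw [if_pos hc, hb]
        rw [getx q r K 0 le_rfl hK]
        rw [if_pos rfl, if_neg (by omega)]
        ring
      · have hcond := cond_iff K a hK h0 haK
        by_cases hc : ((K - a) % K + (K - a) % K) % K = 0
        · rcases hcond.mp hc with h' | ⟨he, ha2⟩
          · exact absurd h' h
          · subst ha2
            have hb : (K - K / 2) % K = K / 2 := by
              rw [Int.emod_eq_of_lt (by omega) (by omega)]
              omega
            rw [if_pos hc, hb]
            rw [getx q r K (K / 2) (by omega) (by omega)]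
            rw [if_neg h, if_pos ⟨he, rfl⟩]
            ring
        · rw [if_neg hc, if_neg h,
            if_neg (fun hx => hc (hcond.mpr (Or.inr hx)))]
          ring)]
  rw [PySem.List.sum_map_add_int]
  rw [sum_spike 0 _ _ (PySem.List.nodup_pyRange_one 0 K),
    if_pos (PySem.List.mem_pyRange_one.mpr ⟨le_refl 0, hK⟩)]
  by_cases he : K % 2 = 0
  · simp only [he, true_and]
    rw [sum_spike (K / 2) _ _ (PySem.List.nodup_pyRange_one 0 K),
      if_pos (PySem.List.mem_pyRange_one.mpr ⟨by omega, by omega⟩)]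
    rw [if_pos trivial]
    ring
  · simp only [he, false_and, if_false]
    have hz : (List.map (fun _ : Int => (0 : Int)) (PySem.List.pyRange 0 K 1)).sum = 0 := by simp
    rw [hz]
    ring

lemma loop_eq_alt (N K : Int) (hK : 1 ≤ K) : loop N K = loop_alt N K := by
  have hK' : 0 < K := hK
  have h2 : (0 : Int) < 2 := by norm_num
  simp only [loop, loop_alt]
  have hx : (PySem.List.pyRange 1 (N + 1) 1).foldl (loopStepA K) (Array.replicate K.toNat 0)
      = ((PySem.List.pyRange 0 K 1).map
          (cntB (PySem.Int.floordiv (if N < 0 then 0 else N) K)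
                (PySem.Int.mod (if N < 0 then 0 else N) K))).toArray := by
    rw [← Array.toList_inj, fold_bridge, List.toList_toArray]
    by_cases hN : N < 0
    · rw [if_pos hN, PySem.List.pyRange_one_eq_nil (by omega)]
      simp only [List.foldl_nil]
      rw [PySem.Int.floordiv_eq_ediv_of_pos hK', PySem.Int.mod_eq_emod_of_pos hK']
      simpa using replicate_eq_map_cntB K
    · rw [if_neg hN]
      exact xfold_eq K hK' N (by omega)
  rw [hx]
  set q := PySem.Int.floordiv (if N < 0 then 0 else N) K with hq
  set r := PySem.Int.mod (if N < 0 then 0 else N) K with hr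
  simp only [PySem.Int.mod_eq_emod_of_pos hK', PySem.Int.mod_eq_emod_of_pos h2,
    PySem.Int.floordiv_eq_ediv_of_pos h2]
  exact second_fold q r K hK'

lemma cntB_zero (x : Int) : cntB 0 0 x = 0 := by
  unfold cntB
  split_ifs <;> omega

-- degenerate case K < 0, N ≤ 0: both loops are empty / both closed-form counts are 0
lemma loop_eq_alt_neg (N K : Int) (hK : K ≤ -1) (hN : N ≤ 0) : loop N K = loop_alt N K := by
  simp only [loop, loop_alt]
  rw [PySem.List.pyRange_one_eq_nil (a := 0) (b := K) (by omega), List.foldl_nil]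
  have hN' : (if N < 0 then 0 else N) = 0 := by split <;> omega
  rw [hN']
  have hfd : PySem.Int.floordiv 0 K = 0 := by
    simp [PySem.Int.floordiv]
  have hmd : PySem.Int.mod 0 K = 0 := by
    simp [PySem.Int.mod]
  rw [hfd, hmd, cntB_zero, cntB_zero]
  split_ifs <;> ring

-- ===== VERDICT (by name: the statement is the Claim_ definition above) =====
theorem loop_spec : Claim_equal_loop := by
  intro N K _ hPre
  unfold Spec_loop
  rcases hPre with hK | ⟨hK, hN⟩
  · exact loop_eq_alt N K hK
  · exact loop_eq_alt_neg N K hK hN
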